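-- pv_equiv track=rewrite | github.com/motaz-hejaze/lavaloon-problem-solving-test | problem2.py | heaviest_word
-- ===== SOURCE A (Python) =====
-- alphabet_dict = {
--     "a": 1, "b": 2, "c": 3, "d": 4, "e": 5, "f": 6, "g": 7, "h": 8, "i": 9, "j": 10, "k": 11, \
--     "l": 12, "m": 13, "n": 14, "o": 15, "p": 16, "q": 17, "r": 18, "s": 19, "t": 20, "u": 21,\
--     "v": 22, "w": 23, "x": 24, "y": 25, "z": 26
-- }
--
-- def heaviest_word(sentence):
--     # a dict to put all calculated words
--     all_words_sums = {}
--     # split sentence into list of words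
--     words_list = sentence.split(" ")
--     # loop through all words in words_list
--     for word in words_list:
--         # split current word into a list of characters
--         chars_list = [c for c in word]
--         word_weight = 0
--         # loop through all characters of current word
--         for c in chars_list:
--             # calculate each character and add to word_weight
--             word_weight += alphabet_dict[c]
--         # add key , value to all words dictionary
--         all_words_sums[word] = word_weight
--     # return the (first) key with maximum weight
--     first_max_word = max(all_words_sums, key=all_words_sums.get)
--     return first_max_word
-- ===== SOURCE B (Python) =====
-- alphabet_dict = {
--     "a": 1, "b": 2, "c": 3, "d": 4, "e": 5, "f": 6, "g": 7, "h": 8, "i": 9, "j": 10, "k": 11,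
--     "l": 12, "m": 13, "n": 14, "o": 15, "p": 16, "q": 17, "r": 18, "s": 19, "t": 20, "u": 21,
--     "v": 22, "w": 23, "x": 24, "y": 25, "z": 26
-- }
--
--
-- def heaviest_word(sentence):
--     # single pass, no intermediate dict: keep the current champion word/weight
--     words = sentence.split(" ")
--     best_word = words[0]
--     best_weight = sum(alphabet_dict[c] for c in best_word)
--     for word in words[1:]:
--         weight = sum(alphabet_dict[c] for c in word)
--         if weight > best_weight:
--             best_word = word
--             best_weight = weight
--     return best_word
-- ===== Notes on version B (the rewrite author's own statement) =====
-- stated objective: simpler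
-- what changed: Drops the intermediate dict and the final max-over-keys pass: B splits the sentence and keeps a running champion (best_word, best_weight) in one pass, replacing it only on strictly greater weight so ties keep the first occurrence.
import Mathlib
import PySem

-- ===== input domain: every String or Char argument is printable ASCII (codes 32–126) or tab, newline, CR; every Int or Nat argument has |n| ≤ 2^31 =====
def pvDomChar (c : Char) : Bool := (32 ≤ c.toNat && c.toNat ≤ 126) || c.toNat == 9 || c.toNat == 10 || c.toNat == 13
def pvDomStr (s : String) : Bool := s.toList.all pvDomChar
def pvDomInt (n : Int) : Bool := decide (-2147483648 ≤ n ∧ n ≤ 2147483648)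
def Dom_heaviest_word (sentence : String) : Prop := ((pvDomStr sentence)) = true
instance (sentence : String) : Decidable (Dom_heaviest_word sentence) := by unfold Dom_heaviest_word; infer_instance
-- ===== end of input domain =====

-- B replaces A's word→weight dict plus max-over-keys by a single running-champion pass (strict > keeps the first
-- occurrence); same return value on every input on which A returns (Pre_ excludes the KeyError inputs).

-- ===== PORT A =====
-- the module constant alphabet_dict (a literal dict with distinct single-character keys)
def pvAlpha : PySem.Dict Char Int := PySem.Dict.mk
  [('a',1),('b',2),('c',3),('d',4),('e',5),('f',6),('g',7),('h',8),('i',9),('j',10),('k',11),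
   ('l',12),('m',13),('n',14),('o',15),('p',16),('q',17),('r',18),('s',19),('t',20),('u',21),
   ('v',22),('w',23),('x',24),('y',25),('z',26)]

-- alphabet_dict[c] raises KeyError off 'a'..'z'; Pre_ excludes those inputs, so the `.getD 0` default never fires
-- inside Pre_.  max over a dict iterates its keys; the dict is never empty (split returns ≥ 1 piece), so `.getD ""`
-- never fires either.
def heaviest_word (sentence : String) : String :=
  let words_list := (PySem.Str.split? sentence " ").getD []
  let all_words_sums := words_list.foldl
    (fun d word =>
      let chars_list := word.toList
      let word_weight := chars_list.foldl (fun acc c => acc + (pvAlpha.get? c).getD 0) 0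
      d.insert word word_weight)
    PySem.Dict.empty
  (PySem.List.max? all_words_sums.keys (fun w => (all_words_sums.get? w).getD 0)).getD ""

-- ===== PORT B =====
-- sum(alphabet_dict[c] for c in word); Pre_ again keeps every lookup inside the dict
def pvWeight (w : List Char) : Int := (w.map (fun c => (pvAlpha.get? c).getD 0)).sum

def heaviest_word_alt (sentence : String) : String :=
  match (PySem.Str.split? sentence " ").getD [] with
  | [] => ""           -- unreachable: split(" ") always yields at least one piece
  | w :: rest =>
    (rest.foldl
      (fun (p : String × Int) word =>
        let weight := pvWeight word.toList
        if p.2 < weight then (word, weight) else p)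
      (w, pvWeight w.toList)).1

-- ===== PRECONDITION & SPEC =====
-- Pre_ excludes exactly the sentences containing a character other than ' ' or 'a'..'z': there Python A (and B)
-- raises KeyError.
def Pre_heaviest_word (sentence : String) : Prop :=
  (sentence.toList.all (fun c => (c == ' ') || ('a' ≤ c && c ≤ 'z'))) = true
instance (sentence : String) : Decidable (Pre_heaviest_word sentence) := by
  unfold Pre_heaviest_word; infer_instance

def pvWitness_heaviest_word : String := "abc de z"

def Spec_heaviest_word (sentence : String) (out : String) : Prop := out = heaviest_word_alt sentence
instance (sentence : String) (out : String) : Decidable (Spec_heaviest_word sentence out) := by unfold Spec_heaviest_word; infer_instance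

-- ===== CLAIM (what is proved, stated in full; the proofs are below) =====
def Claim_equal_heaviest_word : Prop := ∀ (sentence : String), Dom_heaviest_word sentence → Pre_heaviest_word sentence → Spec_heaviest_word sentence (heaviest_word sentence)

-- ===== LEMMAS AND PROOFS =====

-- weight of a word, shared vocabulary of the proofs
def pvW (w : String) : Int := pvWeight w.toList

-- A's inline character loop computes pvW
theorem pvW_eq_foldl (w : String) :
    w.toList.foldl (fun acc c => acc + (pvAlpha.get? c).getD 0) 0 = pvW w := by
  unfold pvW pvWeight
  rw [List.sum_eq_foldl, List.foldl_map]

def pvPair (w : String) : String × Int := (w, pvW w)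

-- A's "seen keys" evolution: dict key order = first-occurrence order
def pvUniq (us : List String) (w : String) : List String :=
  if w ∈ us then us else us ++ [w]

theorem find?_map_pair (us : List String) (w : String) (h : w ∈ us) :
    (us.map pvPair).find? (fun p => p.1 == w) = some (w, pvW w) := by
  induction us with
  | nil => cases h
  | cons u us ih =>
    by_cases hu : u = w
    · subst hu; simp [pvPair]
    · have : w ∈ us := by cases h with
        | head => exact absurd rfl hu
        | tail _ h' => exact h'
      simpa [pvPair, List.find?, hu] using ih this

theorem get?_map_pair (us : List String) (w : String) (h : w ∈ us) :
    ((PySem.Dict.mk (us.map pvPair)).get? w).getD 0 = pvW w := by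
  simp [PySem.Dict.get?, find?_map_pair us w h]

theorem contains_map_pair (us : List String) (w : String) :
    (PySem.Dict.mk (us.map pvPair)).contains w = decide (w ∈ us) := by
  induction us with
  | nil => simp [PySem.Dict.contains]
  | cons u us ih =>
    by_cases hu : u = w
    · subst hu; simp [PySem.Dict.contains, pvPair]
    · simp only [PySem.Dict.contains, List.map_cons, List.any_cons] at *
      simp [pvPair, hu, ih, Ne.symm hu]

-- the dict A builds: items are the first-occurrence key list paired with pvW
theorem build_dict (ws : List String) : ∀ us : List String,
    ws.foldl
      (fun d word =>
        let chars_list := word.toList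
        let word_weight := chars_list.foldl (fun acc c => acc + (pvAlpha.get? c).getD 0) 0
        d.insert word word_weight)
      (PySem.Dict.mk (us.map pvPair))
    = PySem.Dict.mk ((ws.foldl pvUniq us).map pvPair) := by
  induction ws with
  | nil => intro us; rfl
  | cons w ws ih =>
    intro us
    have hstep :
        (PySem.Dict.mk (us.map pvPair)).insert w
            (w.toList.foldl (fun acc c => acc + (pvAlpha.get? c).getD 0) 0)
        = PySem.Dict.mk ((pvUniq us w).map pvPair) := by
      rw [pvW_eq_foldl]
      unfold PySem.Dict.insert
      rw [contains_map_pair]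
      by_cases h : w ∈ us
      · simp only [h, decide_true, if_true, pvUniq, PySem.Dict.mk.injEq]
        rw [List.map_map]
        apply List.map_congr_left
        intro u _
        by_cases hu : u = w
        · subst hu; simp [pvPair]
        · simp [pvPair, hu]
      · simp [h, pvUniq, pvPair]
    simpa [hstep] using ih (pvUniq us w)

-- max? only looks at the key function on members of the list
theorem max?_congr (xs : List String) (g h : String → Int) (hgh : ∀ x ∈ xs, g x = h x) :
    PySem.List.max? xs g = PySem.List.max? xs h := by
  induction xs using List.reverseRecOn with
  | nil => rfl
  | append_singleton xs x ih =>
    have hgh' : ∀ y ∈ xs, g y = h y := fun y hy => hgh y (List.mem_append_left _ hy)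
    have hx : g x = h x := hgh x (List.mem_append_right _ (List.mem_singleton.mpr rfl))
    have ih' := ih hgh'
    rcases hm : PySem.List.max? xs h with _ | m
    · have hxs : xs = [] := (PySem.List.max?_eq_none_iff xs h).mp hm
      subst hxs
      rfl
    · have hmem : m ∈ xs := PySem.List.max?_mem hm
      have hg' : PySem.List.max? xs g = some m := ih' ▸ hm
      unfold PySem.List.max? at hg' hm ⊢
      rw [List.foldl_append, List.foldl_append, hg', hm]
      simp only [List.foldl_cons, List.foldl_nil]
      rw [hgh' m hmem, hx]

-- core simulation: A's first-max over the deduplicated key list = B's running champion over all words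
theorem main_sim (ws : List String) : ∀ (us : List String) (m : String),
    PySem.List.max? us pvW = some m →
    PySem.List.max? (ws.foldl pvUniq us) pvW
      = some ((ws.foldl
          (fun (p : String × Int) word =>
            let weight := pvWeight word.toList
            if p.2 < weight then (word, weight) else p)
          (m, pvW m)).1) := by
  induction ws with
  | nil => intro us m h; simpa using h
  | cons w ws ih =>
    intro us m h
    by_cases hw : w ∈ us
    · have hle : pvW w ≤ pvW m := PySem.List.max?_isMax h w hw
      have hnlt : ¬ (pvW m < pvW w) := not_lt.mpr hle
      simp only [List.foldl_cons, pvUniq, hw, if_true]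
      have : (if pvW m < pvWeight w.toList then (w, pvWeight w.toList) else (m, pvW m)) = (m, pvW m) := by
        simp [pvW] at hnlt ⊢; omega
      rw [show (let weight := pvWeight w.toList;
          if (m, pvW m).2 < weight then (w, weight) else (m, pvW m)) = (m, pvW m) from this]
      exact ih us m h
    · have happ : PySem.List.max? (us ++ [w]) pvW
          = if pvW m < pvW w then some w else some m := by
        unfold PySem.List.max? at h ⊢
        rw [List.foldl_append, h]
        rfl
      simp only [List.foldl_cons, pvUniq, hw, if_false]
      by_cases hlt : pvW m < pvW w
      · have h' : PySem.List.max? (us ++ [w]) pvW = some w := by rw [happ, if_pos hlt]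
        have hstep : (let weight := pvWeight w.toList;
            if (m, pvW m).2 < weight then (w, weight) else (m, pvW m)) = (w, pvW w) := by
          simp only [pvW] at hlt ⊢; simp [hlt]
        rw [hstep]
        exact ih (us ++ [w]) w h'
      · have h' : PySem.List.max? (us ++ [w]) pvW = some m := by rw [happ, if_neg hlt]
        have hstep : (let weight := pvWeight w.toList;
            if (m, pvW m).2 < weight then (w, weight) else (m, pvW m)) = (m, pvW m) := by
          simp only [pvW] at hlt ⊢; simp [hlt]
        rw [hstep]
        exact ih (us ++ [w]) m h'

theorem keys_map_pair (us : List String) :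
    (PySem.Dict.mk (us.map pvPair)).keys = us := by
  simp [PySem.Dict.keys, List.map_map, Function.comp_def, pvPair]

-- ===== VERDICT (by name: the statement is the Claim_ definition above) =====
theorem heaviest_word_spec : Claim_equal_heaviest_word := by
  intro sentence _ _
  unfold Spec_heaviest_word heaviest_word heaviest_word_alt
  cases hws : (PySem.Str.split? sentence " ").getD [] with
  | nil => rfl
  | cons w rest =>
    simp only []
    have hbuild := build_dict (w :: rest) []
    simp only [List.map_nil] at hbuild
    rw [show (PySem.Dict.mk ([] : List (String × Int))) = PySem.Dict.empty from rfl] at hbuild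
    rw [hbuild]
    have hfold1 : (w :: rest).foldl pvUniq [] = rest.foldl pvUniq [w] := by
      simp [pvUniq]
    set us := rest.foldl pvUniq [w] with hus
    rw [hfold1, keys_map_pair]
    have hcongr : PySem.List.max? us (fun x => ((PySem.Dict.mk (us.map pvPair)).get? x).getD 0)
        = PySem.List.max? us pvW :=
      max?_congr us _ pvW (fun x hx => get?_map_pair us x hx)
    rw [hcongr]
    have hbase : PySem.List.max? [w] pvW = some w := rfl
    rw [main_sim rest [w] w hbase]
    rfl
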